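-- pv_equiv track=rewrite | github.com/Alessandro-Carotenuto/RL-2025-Learning-World-Graphs-to-Accelerate-Hierarchical-Reinforcement-Learning-Project | local_networks/hierarchical_system.py | generate_actions_from_path
-- ===== SOURCE A (Python) =====
-- def generate_actions_from_path(path, current_agent_dir):
--     """Convert position path to action sequence based on current orientation."""
--     actions = []
--     agent_dir = current_agent_dir
--
--     for i in range(len(path) - 1):
--         curr_pos = path[i]
--         next_pos = path[i + 1]
--
--         # Compute required direction from geometry
--         dx = next_pos[0] - curr_pos[0]
--         dy = next_pos[1] - curr_pos[1]
--
--         if dx > 0: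
--             required_dir = 0  # Right
--         elif dy > 0:
--             required_dir = 1  # Down
--         elif dx < 0:
--             required_dir = 2  # Left
--         elif dy < 0:
--             required_dir = 3  # Up
--         else:
--             continue  # Same position, skip
--
--         # Generate turns to face required direction
--         while agent_dir != required_dir:
--             diff = (required_dir - agent_dir) % 4
--             if diff <= 2:
--                 actions.append(1)  # turn_right
--                 agent_dir = (agent_dir + 1) % 4
--             else:
--                 actions.append(0)  # turn_left
--                 agent_dir = (agent_dir - 1) % 4
--
--         # Move forward
--         actions.append(2)
--
--     return actions
-- ===== SOURCE B (Python) =====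
-- _TURNS = {0: [], 1: [1], 2: [1, 1], 3: [0]}  # diff -> turn actions (1=right, 0=left)
--
-- def generate_actions_from_path(path, current_agent_dir):
--     """Convert position path to action sequence based on current orientation."""
--     actions = []
--     agent_dir = current_agent_dir
--     for (x0, y0), (x1, y1) in zip(path, path[1:]):
--         if x1 > x0:
--             required_dir = 0
--         elif y1 > y0:
--             required_dir = 1
--         elif x1 < x0:
--             required_dir = 2
--         elif y1 < y0:
--             required_dir = 3
--         else:
--             continue
--         actions.extend(_TURNS[(required_dir - agent_dir) % 4])
--         agent_dir = required_dir
--         actions.append(2)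
--     return actions
-- ===== Notes on version B (the rewrite author's own statement) =====
-- stated objective: simpler
-- what changed: The turn-by-turn while loop is replaced by a closed form: diff=(required_dir-agent_dir)%4 is computed once and the whole turn sequence is appended via a precomputed table, and the index loop becomes a zip over consecutive points.
-- intended difference: When current_agent_dir lies outside 0..3 and the first moving step's required direction is congruent to it mod 4, A emits a spurious turn-right/turn-left pair [1,0] before moving (leftover state of its while loop on an un-normalised direction); B emits no turns there, which is the intended behaviour since the agent already faces the required direction mod 4. — e.g. on generate_actions_from_path([(0, 0), (1, 0)], 4): A returns [1, 0, 2], B returns [2]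
import Mathlib
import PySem

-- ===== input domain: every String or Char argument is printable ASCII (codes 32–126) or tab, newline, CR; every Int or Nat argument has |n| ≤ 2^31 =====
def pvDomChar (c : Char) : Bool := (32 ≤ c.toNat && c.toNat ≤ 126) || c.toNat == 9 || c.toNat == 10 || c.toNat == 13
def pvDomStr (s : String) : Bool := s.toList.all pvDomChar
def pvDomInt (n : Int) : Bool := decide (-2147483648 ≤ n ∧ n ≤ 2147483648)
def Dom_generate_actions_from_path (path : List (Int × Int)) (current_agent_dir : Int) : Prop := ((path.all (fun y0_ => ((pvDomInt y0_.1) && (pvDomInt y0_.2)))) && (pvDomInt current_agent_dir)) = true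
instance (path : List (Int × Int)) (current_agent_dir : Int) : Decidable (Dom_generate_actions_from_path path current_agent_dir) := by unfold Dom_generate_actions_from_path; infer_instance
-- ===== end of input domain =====

-- B replaces A's turn-by-turn while loop by a closed-form table lookup on (required_dir - agent_dir) % 4 (objective: simpler).

-- ===== PORT A =====
-- A's inner `while agent_dir != required_dir` loop; the loop runs at most 4 times
-- (after one turn agent_dir is in [0,4)), so fuel 8 only makes the recursion structural.
def pvTurnsA (fuel : Nat) (st : List Int × Int) (required_dir : Int) : List Int × Int :=
  match fuel with
  | 0 => st
  | f + 1 =>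
    if st.2 ≠ required_dir then
      let diff := PySem.Int.mod (required_dir - st.2) 4
      if diff ≤ 2 then
        pvTurnsA f (st.1 ++ [1], PySem.Int.mod (st.2 + 1) 4) required_dir
      else
        pvTurnsA f (st.1 ++ [0], PySem.Int.mod (st.2 - 1) 4) required_dir
    else st

def generate_actions_from_path (path : List (Int × Int)) (current_agent_dir : Int) : List Int :=
  -- for i in range(len(path)-1): path[i], path[i+1] are always in range, so pyGetD is exact
  ((PySem.List.pyRange 0 ((path.length : Int) - 1) 1).foldl
    (fun (st : List Int × Int) i =>
      let curr_pos := PySem.List.pyGetD path i (0, 0)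
      let next_pos := PySem.List.pyGetD path (i + 1) (0, 0)
      let dx := next_pos.1 - curr_pos.1
      let dy := next_pos.2 - curr_pos.2
      if dx > 0 then
        let st' := pvTurnsA 8 st 0; (st'.1 ++ [2], st'.2)
      else if dy > 0 then
        let st' := pvTurnsA 8 st 1; (st'.1 ++ [2], st'.2)
      else if dx < 0 then
        let st' := pvTurnsA 8 st 2; (st'.1 ++ [2], st'.2)
      else if dy < 0 then
        let st' := pvTurnsA 8 st 3; (st'.1 ++ [2], st'.2)
      else st)
    ([], current_agent_dir)).1

-- ===== PORT B =====
def pvTurnMap (diff : Int) : List Int :=  -- Source B's _TURNS table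
  if diff = 1 then [1] else if diff = 2 then [1, 1] else if diff = 3 then [0] else []

def generate_actions_from_path_alt (path : List (Int × Int)) (current_agent_dir : Int) : List Int :=
  -- zip(path, path[1:]) = path.zip (path.drop 1)
  ((path.zip (path.drop 1)).foldl
    (fun (st : List Int × Int) pq =>
      match pq with
      | ((x0, y0), (x1, y1)) =>
        if x1 > x0 then (st.1 ++ pvTurnMap (PySem.Int.mod (0 - st.2) 4) ++ [2], 0)
        else if y1 > y0 then (st.1 ++ pvTurnMap (PySem.Int.mod (1 - st.2) 4) ++ [2], 1)
        else if x1 < x0 then (st.1 ++ pvTurnMap (PySem.Int.mod (2 - st.2) 4) ++ [2], 2)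
        else if y1 < y0 then (st.1 ++ pvTurnMap (PySem.Int.mod (3 - st.2) 4) ++ [2], 3)
        else st)
    ([], current_agent_dir)).1

-- ===== PRECONDITION & SPEC =====
-- helper for D_ only: the required direction of the first moving step of the path, if any
def pvReq (p q : Int × Int) : Option Int :=
  if q.1 > p.1 then some 0 else if q.2 > p.2 then some 1
  else if q.1 < p.1 then some 2 else if q.2 < p.2 then some 3 else none

def pvFirstReq : List (Int × Int) → Option Int
  | [] => none
  | [_] => none
  | p :: q :: rest => match pvReq p q with
    | some r => some r
    | none => pvFirstReq (q :: rest)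

-- When current_agent_dir is outside 0..3 and the first moving step's required direction is
-- congruent to it mod 4, A returns a spurious [1,0] turn pair before the move (leftover state
-- of its while loop on an un-normalised direction); B returns no turns there, the intended value.
def D_generate_actions_from_path (path : List (Int × Int)) (current_agent_dir : Int) : Prop :=
  (current_agent_dir < 0 ∨ 4 ≤ current_agent_dir) ∧
  (pvFirstReq path).any (fun r => PySem.Int.mod (r - current_agent_dir) 4 == 0) = true
instance (path : List (Int × Int)) (current_agent_dir : Int) : Decidable (D_generate_actions_from_path path current_agent_dir) := by unfold D_generate_actions_from_path; infer_instance

def Spec_generate_actions_from_path (path : List (Int × Int)) (current_agent_dir : Int) (out : List Int) : Prop := ¬ D_generate_actions_from_path path current_agent_dir → out = generate_actions_from_path_alt path current_agent_dir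
instance (path : List (Int × Int)) (current_agent_dir : Int) (out : List Int) : Decidable (Spec_generate_actions_from_path path current_agent_dir out) := by unfold Spec_generate_actions_from_path; infer_instance

def pvDiffWitness_generate_actions_from_path : (List (Int × Int)) × Int := ([(0, 0), (1, 0)], 4)
def pvDiffWitnessOut_generate_actions_from_path : (List Int) × (List Int) := ([1, 0, 2], [2])

-- ===== CLAIM (what is proved, stated in full; the proofs are below) =====
def Claim_unchanged_generate_actions_from_path : Prop := ∀ (path : List (Int × Int)) (current_agent_dir : Int), Dom_generate_actions_from_path path current_agent_dir → Spec_generate_actions_from_path path current_agent_dir (generate_actions_from_path path current_agent_dir)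
def Claim_changed_generate_actions_from_path : Prop := Dom_generate_actions_from_path (pvDiffWitness_generate_actions_from_path.1) (pvDiffWitness_generate_actions_from_path.2) ∧ D_generate_actions_from_path (pvDiffWitness_generate_actions_from_path.1) (pvDiffWitness_generate_actions_from_path.2) ∧ generate_actions_from_path (pvDiffWitness_generate_actions_from_path.1) (pvDiffWitness_generate_actions_from_path.2) = pvDiffWitnessOut_generate_actions_from_path.1 ∧ generate_actions_from_path_alt (pvDiffWitness_generate_actions_from_path.1) (pvDiffWitness_generate_actions_from_path.2) = pvDiffWitnessOut_generate_actions_from_path.2 ∧ pvDiffWitnessOut_generate_actions_from_path.1 ≠ pvDiffWitnessOut_generate_actions_from_path.2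
def Claim_exact_generate_actions_from_path : Prop := ∀ (path : List (Int × Int)) (current_agent_dir : Int), Dom_generate_actions_from_path path current_agent_dir → D_generate_actions_from_path path current_agent_dir → generate_actions_from_path path current_agent_dir ≠ generate_actions_from_path_alt path current_agent_dir

-- ===== LEMMAS AND PROOFS =====
theorem pvTurnsA_acc (f : Nat) : ∀ (ad r : Int) (acc : List Int),
    pvTurnsA f (acc, ad) r = (acc ++ (pvTurnsA f ([], ad) r).1, (pvTurnsA f ([], ad) r).2) := by
  induction f with
  | zero => intro ad r acc; simp [pvTurnsA]
  | succ f ih =>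
    intro ad r acc
    simp only [pvTurnsA]
    by_cases h : ad = r
    · simp [h]
    · simp only [h, ne_eq, not_false_iff, if_true]
      split_ifs with h2
      · rw [ih _ _ (acc ++ [1]), ih _ _ ([] ++ [1])]
        simp
      · rw [ih _ _ (acc ++ [0]), ih _ _ ([] ++ [0])]
        simp

theorem pvTurnsA_succ (f : Nat) (acc : List Int) (ad r : Int) :
    pvTurnsA (f + 1) (acc, ad) r =
      if ad ≠ r then
        (if PySem.Int.mod (r - ad) 4 ≤ 2 then pvTurnsA f (acc ++ [1], PySem.Int.mod (ad + 1) 4) r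
         else pvTurnsA f (acc ++ [0], PySem.Int.mod (ad - 1) 4) r)
      else (acc, ad) := rfl

theorem pvTurnsA7_inrange (ad r : Int) (h1 : 0 ≤ ad) (h2 : ad < 4) (h3 : 0 ≤ r) (h4 : r < 4)
    (acc : List Int) :
    pvTurnsA 7 (acc, ad) r = (acc ++ pvTurnMap ((r - ad) % 4), r) := by
  rw [pvTurnsA_acc]
  interval_cases ad <;> interval_cases r <;> simp <;> decide

theorem pvTurnsA_closed (ad r : Int) (h3 : 0 ≤ r) (h4 : r < 4) (acc : List Int) :
    pvTurnsA 8 (acc, ad) r =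
      (acc ++ (if ad ≠ r ∧ PySem.Int.mod (r - ad) 4 = 0 then [1, 0]
               else pvTurnMap (PySem.Int.mod (r - ad) 4)), r) := by
  have hm : ∀ a : Int, PySem.Int.mod a 4 = a % 4 :=
    fun a => PySem.Int.mod_eq_emod_of_pos (by norm_num)
  have e : pvTurnsA 8 (acc, ad) r = _ := pvTurnsA_succ 7 acc ad r
  simp only [hm] at e ⊢
  by_cases h : ad = r
  · subst h
    simp only [ne_eq, not_true_eq_false, if_false] at e
    simp [e, pvTurnMap]
  · rw [if_pos h] at e
    have hd : (r - ad) % 4 = 0 ∨ (r - ad) % 4 = 1 ∨ (r - ad) % 4 = 2 ∨ (r - ad) % 4 = 3 := by omega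
    rcases hd with hd | hd | hd | hd
    · rw [hd, if_pos (by norm_num)] at e
      rw [e, pvTurnsA7_inrange ((ad + 1) % 4) r (by omega) (by omega) h3 h4]
      have h31 : (r - (ad + 1) % 4) % 4 = 3 := by omega
      rw [h31, if_pos ⟨h, hd⟩]
      simp [pvTurnMap]
    · rw [hd, if_pos (by norm_num)] at e
      rw [e, pvTurnsA7_inrange ((ad + 1) % 4) r (by omega) (by omega) h3 h4]
      have h31 : (r - (ad + 1) % 4) % 4 = 0 := by omega
      rw [h31, hd, if_neg (by simp)]
      simp [pvTurnMap]
    · rw [hd, if_pos (by norm_num)] at e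
      rw [e, pvTurnsA7_inrange ((ad + 1) % 4) r (by omega) (by omega) h3 h4]
      have h31 : (r - (ad + 1) % 4) % 4 = 1 := by omega
      rw [h31, hd, if_neg (by simp)]
      simp [pvTurnMap]
    · rw [hd, if_neg (by norm_num)] at e
      rw [e, pvTurnsA7_inrange ((ad - 1) % 4) r (by omega) (by omega) h3 h4]
      have h31 : (r - (ad - 1) % 4) % 4 = 0 := by omega
      rw [h31, hd, if_neg (by simp)]
      simp [pvTurnMap]

def pvStepA (st : List Int × Int) (pq : (Int × Int) × (Int × Int)) : List Int × Int :=
  match pvReq pq.1 pq.2 with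
  | none => st
  | some r => ((pvTurnsA 8 st r).1 ++ [2], (pvTurnsA 8 st r).2)

def pvStepB (st : List Int × Int) (pq : (Int × Int) × (Int × Int)) : List Int × Int :=
  match pvReq pq.1 pq.2 with
  | none => st
  | some r => (st.1 ++ pvTurnMap (PySem.Int.mod (r - st.2) 4) ++ [2], r)

theorem pvReq_range (p q : Int × Int) (r : Int) (h : pvReq p q = some r) : 0 ≤ r ∧ r < 4 := by
  unfold pvReq at h
  split_ifs at h <;> (injection h with h; omega)

theorem pyGetD_cons_succ' (x : Int × Int) (xs : List (Int × Int)) (i : Int) (h : 0 ≤ i)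
    (d : Int × Int) : PySem.List.pyGetD (x :: xs) (i + 1) d = PySem.List.pyGetD xs i d := by
  rw [PySem.List.pyGetD_of_nonneg _ _ (by omega), PySem.List.pyGetD_of_nonneg _ _ h]
  have h1 : (i + 1).toNat = i.toNat + 1 := by omega
  rw [h1, List.getD_cons_succ]

theorem pyRange_shift (b : Int) :
    PySem.List.pyRange 1 b 1 = (PySem.List.pyRange 0 (b - 1) 1).map (· + 1) := by
  apply List.ext_getElem
  · simp [PySem.List.length_pyRange_one]
  · intro k h1 h2
    simp only [List.getElem_map, PySem.List.getElem_pyRange_one]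
    omega

-- A's index fold over range(len(path)-1) equals the fold of pvStepA over adjacent pairs
theorem pvA_pairs : ∀ (path : List (Int × Int)) (st : List Int × Int),
    (PySem.List.pyRange 0 ((path.length : Int) - 1) 1).foldl
      (fun st i => pvStepA st (PySem.List.pyGetD path i (0, 0), PySem.List.pyGetD path (i + 1) (0, 0))) st
    = (path.zip (path.drop 1)).foldl pvStepA st := by
  intro path
  induction path with
  | nil => intro st; rw [PySem.List.pyRange_one_eq_nil (by norm_num)]; rfl
  | cons p ps ih =>
    cases ps with
    | nil => intro st; rw [PySem.List.pyRange_one_eq_nil (by norm_num)]; rfl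
    | cons q rest =>
      intro st
      rw [PySem.List.pyRange_one_cons (by simp only [List.length_cons]; push_cast; omega)]
      simp only [List.foldl_cons]
      have hb : ((((p :: q :: rest).length : Int) - 1)) = ((q :: rest).length : Int) := by
        simp only [List.length_cons]; push_cast; omega
      rw [hb]
      simp only [zero_add]
      rw [pyRange_shift, List.foldl_map]
      have hcongr : ∀ (acc : List Int × Int), ∀ i ∈ PySem.List.pyRange 0 (((q :: rest).length : Int) - 1) 1,
          pvStepA acc (PySem.List.pyGetD (p :: q :: rest) (i + 1) (0,0),
                       PySem.List.pyGetD (p :: q :: rest) (i + 1 + 1) (0,0))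
          = pvStepA acc (PySem.List.pyGetD (q :: rest) i (0,0),
                         PySem.List.pyGetD (q :: rest) (i + 1) (0,0)) := by
        intro acc i hi
        have h0 : 0 ≤ i := (PySem.List.mem_pyRange_one.mp hi).1
        rw [pyGetD_cons_succ' _ _ _ h0, pyGetD_cons_succ' _ _ _ (by omega)]
      rw [PySem.List.foldl_congr_mem _ _ _ _ hcongr, ih]
      have h00 : PySem.List.pyGetD (p :: q :: rest) 0 (0,0) = p := by
        rw [PySem.List.pyGetD_of_nonneg _ _ (by norm_num)]; rfl
      have h01 : PySem.List.pyGetD (p :: q :: rest) 1 (0,0) = q := by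
        rw [PySem.List.pyGetD_of_nonneg _ _ (by norm_num)]; rfl
      rw [h00, h01]
      rfl

-- the two folds agree given the no-spurious-turn condition on the FIRST moving step
theorem pvFold_eq_inrange : ∀ (pairs : List ((Int × Int) × (Int × Int))) (acc : List Int) (ad : Int),
    0 ≤ ad → ad < 4 →
    pairs.foldl pvStepA (acc, ad) = pairs.foldl pvStepB (acc, ad) := by
  intro pairs
  induction pairs with
  | nil => intros; rfl
  | cons pq rest ih =>
    intro acc ad h1 h2
    simp only [List.foldl_cons]
    cases hq : pvReq pq.1 pq.2 with
    | none => simp only [pvStepA, pvStepB, hq]; exact ih acc ad h1 h2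
    | some r =>
      obtain ⟨hr1, hr2⟩ := pvReq_range _ _ _ hq
      have hm : PySem.Int.mod (r - ad) 4 = (r - ad) % 4 :=
        PySem.Int.mod_eq_emod_of_pos (by norm_num)
      simp only [pvStepA, pvStepB, hq]
      rw [pvTurnsA_closed ad r hr1 hr2 acc]
      rw [if_neg (by rw [hm]; rintro ⟨hne, hz⟩; exact hne (by omega))]
      simp only [List.append_assoc]
      exact ih _ r hr1 hr2

def pvFirstReqP : List ((Int × Int) × (Int × Int)) → Option Int
  | [] => none
  | pq :: rest => match pvReq pq.1 pq.2 with
    | some r => some r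
    | none => pvFirstReqP rest

theorem pvFirstReq_eq_P : ∀ (path : List (Int × Int)),
    pvFirstReq path = pvFirstReqP (path.zip (path.drop 1)) := by
  intro path
  induction path with
  | nil => rfl
  | cons p ps ih =>
    cases ps with
    | nil => rfl
    | cons q rest =>
      show pvFirstReq (p :: q :: rest) = pvFirstReqP ((p, q) :: (q :: rest).zip rest)
      have : (q :: rest).zip rest = (q :: rest).zip ((q :: rest).drop 1) := rfl
      rw [this]
      unfold pvFirstReq pvFirstReqP
      cases pvReq p q <;> simp [ih]

theorem pvFold_eq : ∀ (pairs : List ((Int × Int) × (Int × Int))) (acc : List Int) (ad : Int),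
    (∀ r, pvFirstReqP pairs = some r → ¬(ad ≠ r ∧ (r - ad) % 4 = 0)) →
    pairs.foldl pvStepA (acc, ad) = pairs.foldl pvStepB (acc, ad) := by
  intro pairs
  induction pairs with
  | nil => intros; rfl
  | cons pq rest ih =>
    intro acc ad h
    simp only [List.foldl_cons]
    cases hq : pvReq pq.1 pq.2 with
    | none =>
      simp only [pvStepA, pvStepB, hq]
      exact ih acc ad (fun r hr => h r (by simpa [pvFirstReqP, hq] using hr))
    | some r =>
      obtain ⟨hr1, hr2⟩ := pvReq_range _ _ _ hq
      have hm : PySem.Int.mod (r - ad) 4 = (r - ad) % 4 :=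
        PySem.Int.mod_eq_emod_of_pos (by norm_num)
      have hfr : pvFirstReqP (pq :: rest) = some r := by simp [pvFirstReqP, hq]
      simp only [pvStepA, pvStepB, hq]
      rw [pvTurnsA_closed ad r hr1 hr2 acc]
      rw [if_neg (by rw [hm]; exact h r hfr)]
      simp only [List.append_assoc]
      exact pvFold_eq_inrange rest _ r hr1 hr2

-- both ports as pair-folds
theorem pvA_as_fold (path : List (Int × Int)) (d : Int) :
    generate_actions_from_path path d = ((path.zip (path.drop 1)).foldl pvStepA ([], d)).1 := by
  unfold generate_actions_from_path
  rw [← pvA_pairs path ([], d)]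
  congr 1
  apply PySem.List.foldl_congr_mem
  intro acc i _
  rcases acc with ⟨a, ad⟩
  simp only [pvStepA, pvReq, gt_iff_lt, sub_pos, sub_neg]
  split_ifs <;> rfl

theorem pvB_as_fold (path : List (Int × Int)) (d : Int) :
    generate_actions_from_path_alt path d = ((path.zip (path.drop 1)).foldl pvStepB ([], d)).1 := by
  unfold generate_actions_from_path_alt
  congr 1
  apply PySem.List.foldl_congr_mem
  intro acc pq _
  rcases pq with ⟨⟨x0, y0⟩, ⟨x1, y1⟩⟩
  rcases acc with ⟨a, ad⟩
  simp only [pvStepB, pvReq]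
  split_ifs <;> simp

theorem pvFirstReqP_range : ∀ (pairs : List ((Int × Int) × (Int × Int))) (r : Int),
    pvFirstReqP pairs = some r → 0 ≤ r ∧ r < 4 := by
  intro pairs
  induction pairs with
  | nil => intro r h; simp [pvFirstReqP] at h
  | cons pq rest ih =>
    intro r h
    unfold pvFirstReqP at h
    cases hq : pvReq pq.1 pq.2 with
    | none => rw [hq] at h; exact ih r h
    | some r' => rw [hq] at h; injection h with h; subst h; exact pvReq_range _ _ _ hq

theorem pv_spec : ∀ (path : List (Int × Int)) (d : Int),
    ¬ D_generate_actions_from_path path d →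
    generate_actions_from_path path d = generate_actions_from_path_alt path d := by
  intro path d hnD
  rw [pvA_as_fold, pvB_as_fold]
  rw [pvFold_eq (path.zip (path.drop 1)) [] d ?h]
  case h =>
    intro r hr
    obtain ⟨hr1, hr2⟩ := pvFirstReqP_range _ _ hr
    have hm : PySem.Int.mod (r - d) 4 = (r - d) % 4 :=
      PySem.Int.mod_eq_emod_of_pos (by norm_num)
    by_cases hin : 0 ≤ d ∧ d < 4
    · rintro ⟨hne, hz⟩; exact hne (by omega)
    · rintro ⟨hne, hz⟩
      apply hnD
      refine ⟨by omega, ?_⟩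
      rw [pvFirstReq_eq_P, hr]
      simp [Option.any, hz]

theorem pvFoldA_acc : ∀ (pairs : List ((Int × Int) × (Int × Int))) (acc : List Int) (ad : Int),
    pairs.foldl pvStepA (acc, ad)
      = (acc ++ (pairs.foldl pvStepA ([], ad)).1, (pairs.foldl pvStepA ([], ad)).2) := by
  intro pairs
  induction pairs with
  | nil => intros; simp
  | cons pq rest ih =>
    intro acc ad
    simp only [List.foldl_cons]
    cases hq : pvReq pq.1 pq.2 with
    | none => simp only [pvStepA, hq]; exact ih acc ad
    | some r =>
      simp only [pvStepA, hq]
      rw [pvTurnsA_acc 8 ad r acc]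
      rw [ih (acc ++ (pvTurnsA 8 ([], ad) r).1 ++ [2]) _,
          ih ((pvTurnsA 8 ([], ad) r).1 ++ [2]) _]
      simp

theorem pvFoldB_acc : ∀ (pairs : List ((Int × Int) × (Int × Int))) (acc : List Int) (ad : Int),
    pairs.foldl pvStepB (acc, ad)
      = (acc ++ (pairs.foldl pvStepB ([], ad)).1, (pairs.foldl pvStepB ([], ad)).2) := by
  intro pairs
  induction pairs with
  | nil => intros; simp
  | cons pq rest ih =>
    intro acc ad
    simp only [List.foldl_cons]
    cases hq : pvReq pq.1 pq.2 with
    | none => simp only [pvStepB, hq]; exact ih acc ad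
    | some r =>
      simp only [pvStepB, hq]
      rw [ih (acc ++ pvTurnMap (PySem.Int.mod (r - ad) 4) ++ [2]) r,
          ih ([] ++ pvTurnMap (PySem.Int.mod (r - ad) 4) ++ [2]) r]
      simp

theorem pvFold_diff : ∀ (pairs : List ((Int × Int) × (Int × Int))) (ad r : Int),
    (ad < 0 ∨ 4 ≤ ad) → pvFirstReqP pairs = some r → (r - ad) % 4 = 0 →
    (pairs.foldl pvStepA ([], ad)).1 = 1 :: 0 :: (pairs.foldl pvStepB ([], ad)).1 := by
  intro pairs
  induction pairs with
  | nil => intro ad r _ h; simp [pvFirstReqP] at h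
  | cons pq rest ih =>
    intro ad r hout hfr hz
    simp only [List.foldl_cons]
    cases hq : pvReq pq.1 pq.2 with
    | none =>
      simp only [pvStepA, pvStepB, hq]
      unfold pvFirstReqP at hfr; rw [hq] at hfr
      exact ih ad r hout hfr hz
    | some r' =>
      unfold pvFirstReqP at hfr; rw [hq] at hfr
      injection hfr with hfr; subst hfr
      obtain ⟨hr1, hr2⟩ := pvReq_range _ _ _ hq
      have hm : PySem.Int.mod (r' - ad) 4 = (r' - ad) % 4 :=
        PySem.Int.mod_eq_emod_of_pos (by norm_num)
      simp only [pvStepA, pvStepB, hq]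
      rw [pvTurnsA_closed ad r' hr1 hr2 []]
      rw [if_pos ⟨by omega, by omega⟩]
      rw [hm, hz]
      have hmap : pvTurnMap 0 = [] := rfl
      rw [hmap]
      simp only [List.nil_append, List.append_nil]
      have h102 : ([1, 0] ++ [2] : List Int) = [1, 0, 2] := rfl
      rw [h102]
      rw [pvFoldA_acc rest [1, 0, 2] r', pvFoldB_acc rest [2] r',
          pvFold_eq_inrange rest [] r' hr1 hr2]
      simp

-- ===== VERDICT (by name: the statement is the Claim_ definition above) =====
theorem generate_actions_from_path_spec : Claim_unchanged_generate_actions_from_path := by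
  intro path current_agent_dir _
  exact pv_spec path current_agent_dir

theorem generate_actions_from_path_changed : Claim_changed_generate_actions_from_path := by
  unfold Claim_changed_generate_actions_from_path; decide

theorem generate_actions_from_path_tight : Claim_exact_generate_actions_from_path := by
  intro path d _ hD
  obtain ⟨hout, hany⟩ := hD
  rw [pvFirstReq_eq_P] at hany
  cases hfr : pvFirstReqP (path.zip (path.drop 1)) with
  | none => rw [hfr] at hany; simp [Option.any] at hany
  | some r =>
    rw [hfr] at hany
    simp [Option.any] at hany
    have hz : (r - d) % 4 = 0 := by omega
    rw [pvA_as_fold, pvB_as_fold, pvFold_diff _ d r hout hfr hz]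
    intro h
    have hl := congrArg List.length h
    simp at hl
    omega
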